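-- pv_equiv track=rewrite | github.com/pealco/regatta-opt | regatta_opt.py | generate_races
-- ===== SOURCE A (Python) =====
-- from typing import Dict, List, Optional, Union
--
-- def generate_races(
--     race_definitions: Dict[str, Dict[str, List[str]]], boats_per_race: Dict[str, int]
-- ) -> Dict[str, List[List[int]]]:
--     races: Dict[str, List[List[int]]] = {}
--     for boat_type, categories in race_definitions.items():
--         for category, divisions in categories.items():
--             for division in divisions:
--                 race_name = f"{boat_type}_{category}_{division}"
--                 num_boats = boats_per_race[boat_type]
--                 num_heats = (num_boats + 4) // 5
--                 races[race_name] = [list(range(1, 6)) for _ in range(num_heats)]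
--                 remaining_boats = num_boats % 5
--                 if remaining_boats > 0:
--                     races[race_name][-1] = races[race_name][-1][:remaining_boats]
--     return races
-- ===== SOURCE B (Python) =====
-- def _heats(num_boats):
--     if num_boats <= 0:
--         return []
--     if num_boats <= 5:
--         return [list(range(1, num_boats + 1))]
--     return [[1, 2, 3, 4, 5]] + _heats(num_boats - 5)
--
--
-- def generate_races(race_definitions, boats_per_race):
--     races = {}
--     for boat_type, categories in race_definitions.items():
--         names = [
--             f"{boat_type}_{category}_{division}"
--             for category, divisions in categories.items()
--             for division in divisions
--         ]
--         if names:
--             heats = _heats(boats_per_race[boat_type])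
--             races.update((name, heats) for name in names)
--     return races
-- ===== Notes on version B (the rewrite author's own statement) =====
-- stated objective: alternative
-- what changed: B works per boat type in two stages: it first collects all race names of the boat type in one comprehension, then computes that type's heat list once by recursively peeling off full heats of five, and bulk-inserts the shared list; A instead rebuilds, for every single race, a list of full [1..5] heats and then patches its last element in the stored dict.
import Mathlib
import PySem

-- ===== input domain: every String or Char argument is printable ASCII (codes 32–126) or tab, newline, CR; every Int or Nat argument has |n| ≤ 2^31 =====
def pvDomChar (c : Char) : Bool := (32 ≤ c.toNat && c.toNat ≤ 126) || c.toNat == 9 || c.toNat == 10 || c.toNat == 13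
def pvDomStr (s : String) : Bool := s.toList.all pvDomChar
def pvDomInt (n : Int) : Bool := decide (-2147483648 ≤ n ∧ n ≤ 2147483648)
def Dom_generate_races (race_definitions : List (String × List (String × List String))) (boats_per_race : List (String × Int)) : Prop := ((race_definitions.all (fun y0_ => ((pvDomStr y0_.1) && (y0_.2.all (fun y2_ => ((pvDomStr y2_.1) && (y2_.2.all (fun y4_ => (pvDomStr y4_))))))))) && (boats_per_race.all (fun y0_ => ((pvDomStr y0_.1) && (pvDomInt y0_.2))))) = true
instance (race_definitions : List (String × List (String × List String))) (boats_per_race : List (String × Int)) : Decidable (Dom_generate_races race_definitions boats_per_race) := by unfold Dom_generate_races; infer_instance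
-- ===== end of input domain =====

-- B stages the work per boat type (collect all race names, compute that type's heat list once by
-- recursively peeling full heats of five, bulk-insert the shared list) instead of A's per-race
-- rebuild-all-full-heats-then-patch-the-last-in-the-dict (objective: alternative).

-- ===== PORT A =====
-- loop body of A's innermost 'for division in divisions' (named so the proofs can talk about it)
def pvBodyA (boats_per_race : List (String × Int)) (boat_type category : String)
    (races : PySem.Dict String (List (List Int))) (division : String) :
    PySem.Dict String (List (List Int)) :=
  let race_name := boat_type ++ "_" ++ category ++ "_" ++ division
  -- boats_per_race[boat_type]: KeyError (lookup = none) is excluded by Pre_, default 0 unreached there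
  let num_boats := ((PySem.Dict.mk boats_per_race).get? boat_type).getD 0
  let num_heats := PySem.Int.floordiv (num_boats + 4) 5
  let races := races.insert race_name ((PySem.List.pyRange 0 num_heats 1).map (fun _ => [1, 2, 3, 4, 5]))
  let remaining := PySem.Int.mod num_boats 5
  if remaining > 0 then
    -- races[race_name][-1] = races[race_name][-1][:remaining]; the IndexError on an empty
    -- heat list (num_boats ≤ 0 with remaining > 0) is excluded by Pre_
    let cur := (races.get? race_name).getD []
    let last := (PySem.List.pyGet? cur (-1)).getD []
    races.insert race_name (cur.set (cur.length - 1) (PySem.List.slice last none (some remaining)))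
  else races

def generate_races (race_definitions : List (String × List (String × List String))) (boats_per_race : List (String × Int)) : List (String × List (List Int)) :=
  (race_definitions.foldl (fun races p =>
    p.2.foldl (fun races q =>
      q.2.foldl (pvBodyA boats_per_race p.1 q.1) races) races) PySem.Dict.empty).items

-- ===== PORT B =====
-- port of Source B's recursive _heats
def pvHeatsB (num_boats : Int) : List (List Int) :=
  if num_boats ≤ 0 then []
  else if num_boats ≤ 5 then [PySem.List.pyRange 1 (num_boats + 1) 1]
  else [1, 2, 3, 4, 5] :: pvHeatsB (num_boats - 5)
termination_by num_boats.toNat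
decreasing_by omega

-- 'races.update((name, heats) for name in names)' = insert each (name, heats) in order
def generate_races_alt (race_definitions : List (String × List (String × List String))) (boats_per_race : List (String × Int)) : List (String × List (List Int)) :=
  (race_definitions.foldl (fun races p =>
    let names := p.2.flatMap (fun q => q.2.map (fun division => p.1 ++ "_" ++ q.1 ++ "_" ++ division))
    if names ≠ [] then
      -- boats_per_race[boat_type]: KeyError excluded by Pre_, default 0 unreached there
      let heats := pvHeatsB (((PySem.Dict.mk boats_per_race).get? p.1).getD 0)
      names.foldl (fun races name => races.insert name heats) races
    else races) PySem.Dict.empty).items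

-- ===== PRECONDITION & SPEC =====
-- ok num_boats: the lookup succeeded and A's last-heat patch does not hit an empty heat list
def pvOkN (o : Option Int) : Bool :=
  match o with
  | some n => decide (0 < n ∨ PySem.Int.mod n 5 = 0)
  | none => false

-- Pre_ excludes exactly the inputs on which the Python A raises: a boat_type that has at least
-- one division but no entry in boats_per_race (KeyError), or whose boat count n satisfies
-- n ≤ 0 and n % 5 ≠ 0 (races[race_name][-1] on the empty heat list raises IndexError).
def Pre_generate_races (race_definitions : List (String × List (String × List String))) (boats_per_race : List (String × Int)) : Prop :=
  ∀ p ∈ race_definitions, ∀ q ∈ p.2, q.2 ≠ [] →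
    pvOkN ((PySem.Dict.mk boats_per_race).get? p.1) = true
instance (race_definitions : List (String × List (String × List String))) (boats_per_race : List (String × Int)) : Decidable (Pre_generate_races race_definitions boats_per_race) := by unfold Pre_generate_races; infer_instance

def pvWitness_generate_races : (List (String × List (String × List String))) × (List (String × Int)) :=
  ([("kayak", [("open", ["A", "B"])])], [("kayak", 7)])

def Spec_generate_races (race_definitions : List (String × List (String × List String))) (boats_per_race : List (String × Int)) (out : List (String × List (List Int))) : Prop := out = generate_races_alt race_definitions boats_per_race
instance (race_definitions : List (String × List (String × List String))) (boats_per_race : List (String × Int)) (out : List (String × List (List Int))) : Decidable (Spec_generate_races race_definitions boats_per_race out) := by unfold Spec_generate_races; infer_instance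

-- ===== CLAIM =====
def Claim_equal_generate_races : Prop := ∀ (race_definitions : List (String × List (String × List String))) (boats_per_race : List (String × Int)), Dom_generate_races race_definitions boats_per_race → Pre_generate_races race_definitions boats_per_race → Spec_generate_races race_definitions boats_per_race (generate_races race_definitions boats_per_race)

-- ===== LEMMAS AND PROOFS =====

-- the value A ends up storing for a race whose boat_type has num_boats boats
def pvValAux (h : List (List Int)) (remaining : Int) : List (List Int) :=
  if remaining > 0 then
    h.set (h.length - 1) (PySem.List.slice ((PySem.List.pyGet? h (-1)).getD []) none (some remaining))
  else h

def pvValA (num_boats : Int) : List (List Int) :=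
  pvValAux ((PySem.List.pyRange 0 (PySem.Int.floordiv (num_boats + 4) 5) 1).map (fun _ => ([1, 2, 3, 4, 5] : List Int)))
    (PySem.Int.mod num_boats 5)

-- proof-side closed form both pvValA and pvHeatsB are reduced to
def pvClosed (num_boats : Int) : List (List Int) :=
  PySem.List.pyRepeat [[1, 2, 3, 4, 5]] (PySem.Int.floordiv num_boats 5)
    ++ (if PySem.Int.mod num_boats 5 ≠ 0
        then [PySem.List.pyRange 1 (PySem.Int.mod num_boats 5 + 1) 1] else [])

def pvFlat (race_definitions : List (String × List (String × List String))) : List (String × String × String) :=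
  race_definitions.flatMap (fun p => p.2.flatMap (fun q => q.2.map (fun d => (p.1, q.1, d))))

theorem pv_foldl_flatMap {α β γ : Type} (l : List α) (g : α → List β) (f : γ → β → γ) (i : γ) :
    (l.flatMap g).foldl f i = l.foldl (fun a x => (g x).foldl f a) i := by
  induction l generalizing i with
  | nil => rfl
  | cons h t ih => simp [List.foldl_append, ih]

theorem pv_map_const_pyRange (m : Int) (c : List Int) :
    (PySem.List.pyRange 0 m 1).map (fun _ => c) = List.replicate m.toNat c := by
  rw [PySem.List.pyRange_one]
  simp [List.map_map, Function.comp_def]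

theorem pvBodyA_eq (bpr : List (String × Int)) (bt cat : String)
    (races : PySem.Dict String (List (List Int))) (dv : String) :
    pvBodyA bpr bt cat races dv
      = races.insert (bt ++ "_" ++ cat ++ "_" ++ dv)
          (pvValA (((PySem.Dict.mk bpr).get? bt).getD 0)) := by
  unfold pvBodyA pvValA pvValAux
  set n := ((PySem.Dict.mk bpr).get? bt).getD 0 with hn
  by_cases h : PySem.Int.mod n 5 > 0
  · simp only [h, if_true, PySem.Dict.get?_insert_self, Option.getD_some,
      PySem.Dict.insert_insert_self]
  · simp only [h, if_false]

theorem pvValA_eq_pvClosed (n : Int) (h : 0 < n ∨ PySem.Int.mod n 5 = 0) :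
    pvValA n = pvClosed n := by
  unfold pvValA pvValAux pvClosed
  rw [PySem.Int.floordiv_eq_ediv_of_pos (by norm_num : (0:Int) < 5),
      PySem.Int.floordiv_eq_ediv_of_pos (by norm_num : (0:Int) < 5),
      PySem.Int.mod_eq_emod_of_pos (by norm_num : (0:Int) < 5)]
  rw [pv_map_const_pyRange, PySem.List.pyRepeat_singleton]
  by_cases hr : n % 5 = 0
  · have h1 : (n + 4) / 5 = n / 5 := by omega
    simp [hr, h1]
  · have hn : 0 < n := by
      rcases h with h | h
      · exact h
      · rw [PySem.Int.mod_eq_emod_of_pos (by norm_num : (0:Int) < 5)] at h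
        exact absurd h hr
    have hq : 0 ≤ n / 5 := by positivity
    have h1 : ((n + 4) / 5).toNat = (n / 5).toNat + 1 := by omega
    have hrb : 0 < n % 5 := by omega
    rw [h1]
    simp only [hrb, if_pos, hr, ne_eq, not_false_iff]
    have hset : ∀ (k : Nat) (c v : List Int),
        (List.replicate (k + 1) c).set ((List.replicate (k + 1) c).length - 1) v
          = List.replicate k c ++ [v] := by
      intro k c v
      induction k with
      | zero => rfl
      | succ k ih =>
        simp only [List.replicate_succ, List.length_cons, List.length_replicate] at *
        simpa using congrArg (List.cons c) ih
    have hget : ∀ (k : Nat) (c : List Int),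
        PySem.List.pyGet? (List.replicate (k + 1) c) (-1) = some c := by
      intro k c
      simp [PySem.List.pyGet?, PySem.List.pyIdx?]
    rw [hget, hset]
    have h5 : n % 5 = 1 ∨ n % 5 = 2 ∨ n % 5 = 3 ∨ n % 5 = 4 := by omega
    congr 1
    rcases h5 with h5 | h5 | h5 | h5 <;> rw [h5] <;> decide

theorem pvHeatsB_eq_pvClosed (n : Int) (h : 0 < n ∨ PySem.Int.mod n 5 = 0) :
    pvHeatsB n = pvClosed n := by
  rw [PySem.Int.mod_eq_emod_of_pos (by norm_num : (0:Int) < 5)] at h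
  unfold pvClosed
  rw [PySem.Int.floordiv_eq_ediv_of_pos (by norm_num : (0:Int) < 5),
      PySem.Int.mod_eq_emod_of_pos (by norm_num : (0:Int) < 5),
      PySem.List.pyRepeat_singleton]
  induction n using pvHeatsB.induct with
  | case1 n hle =>
    have hm : n % 5 = 0 := by omega
    have hq : (n / 5).toNat = 0 := by omega
    rw [pvHeatsB]
    simp [hle, hm, hq]
  | case2 n hle h5 =>
    rw [pvHeatsB]
    simp only [hle, if_false, if_pos h5]
    have : n = 1 ∨ n = 2 ∨ n = 3 ∨ n = 4 ∨ n = 5 := by omega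
    rcases this with h1 | h1 | h1 | h1 | h1 <;> subst h1 <;> decide
  | case3 n hle h5 ih =>
    have hok : 0 < n - 5 ∨ (n - 5) % 5 = 0 := by omega
    rw [pvHeatsB]
    simp only [hle, if_false, h5, if_false]
    rw [ih hok]
    have hm : n % 5 = (n - 5) % 5 := by omega
    have hq : (n / 5).toNat = ((n - 5) / 5).toNat + 1 := by omega
    rw [hm, hq, List.replicate_succ, List.cons_append]

theorem pv_A_flat (rd : List (String × List (String × List String))) (bpr : List (String × Int)) :
    generate_races rd bpr
      = ((pvFlat rd).foldl
          (fun d t => d.insert (t.1 ++ "_" ++ t.2.1 ++ "_" ++ t.2.2)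
            (pvValA (((PySem.Dict.mk bpr).get? t.1).getD 0))) PySem.Dict.empty).items := by
  unfold generate_races pvFlat
  rw [pv_foldl_flatMap]
  congr 1
  apply PySem.List.foldl_congr_mem
  intro acc p _
  rw [pv_foldl_flatMap]
  apply PySem.List.foldl_congr_mem
  intro acc2 q _
  rw [List.foldl_map]
  apply PySem.List.foldl_congr_mem
  intro acc3 dv _
  exact pvBodyA_eq bpr p.1 q.1 acc3 dv

theorem pv_B_flat (rd : List (String × List (String × List String))) (bpr : List (String × Int)) :
    generate_races_alt rd bpr
      = ((pvFlat rd).foldl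
          (fun d t => d.insert (t.1 ++ "_" ++ t.2.1 ++ "_" ++ t.2.2)
            (pvHeatsB (((PySem.Dict.mk bpr).get? t.1).getD 0))) PySem.Dict.empty).items := by
  unfold generate_races_alt pvFlat
  rw [pv_foldl_flatMap]
  congr 1
  apply PySem.List.foldl_congr_mem
  intro acc p _
  simp only
  set names := p.2.flatMap (fun q => q.2.map (fun division => p.1 ++ "_" ++ q.1 ++ "_" ++ division)) with hnames
  have hkey : names = (p.2.flatMap (fun q => q.2.map (fun d => (p.1, q.1, d)))).map
      (fun t => t.1 ++ "_" ++ t.2.1 ++ "_" ++ t.2.2) := by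
    rw [hnames]
    simp [List.map_flatMap, List.map_map, Function.comp_def]
  have hrhs : (p.2.flatMap (fun q => q.2.map (fun d => (p.1, q.1, d)))).foldl
      (fun d t => d.insert (t.1 ++ "_" ++ t.2.1 ++ "_" ++ t.2.2)
        (pvHeatsB (((PySem.Dict.mk bpr).get? t.1).getD 0))) acc
      = names.foldl (fun d nm => d.insert nm
          (pvHeatsB (((PySem.Dict.mk bpr).get? p.1).getD 0))) acc := by
    rw [hkey, List.foldl_map]
    apply PySem.List.foldl_congr_mem
    intro a t ht
    have ht1 : t.1 = p.1 := by
      rcases List.mem_flatMap.1 ht with ⟨q, _, ht2⟩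
      rcases List.mem_map.1 ht2 with ⟨dv, _, heq⟩
      rw [← heq]
    rw [ht1]
  rw [hrhs]
  by_cases hne : names = []
  · simp [hne]
  · simp [hne]

theorem pv_mem_flat {rd : List (String × List (String × List String))}
    {t : String × String × String} (ht : t ∈ pvFlat rd) :
    ∃ p ∈ rd, p.1 = t.1 ∧ ∃ q ∈ p.2, q.2 ≠ [] := by
  unfold pvFlat at ht
  rcases List.mem_flatMap.1 ht with ⟨p, hp, ht2⟩
  rcases List.mem_flatMap.1 ht2 with ⟨q, hq, ht3⟩
  rcases List.mem_map.1 ht3 with ⟨dv, hdv, heq⟩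
  exact ⟨p, hp, by rw [← heq], q, hq, List.ne_nil_of_mem hdv⟩

-- ===== VERDICT =====
theorem generate_races_spec : Claim_equal_generate_races := by
  intro rd bpr _ hpre
  unfold Spec_generate_races
  rw [pv_A_flat, pv_B_flat]
  congr 1
  apply PySem.List.foldl_congr_mem
  intro acc t ht
  rcases pv_mem_flat ht with ⟨p, hp, hp1, q, hq, hqne⟩
  have hok := hpre p hp q hq hqne
  rw [hp1] at hok
  rcases hcase : (PySem.Dict.mk bpr).get? t.1 with _ | n
  · simp [pvOkN, hcase] at hok
  · rw [hcase] at hok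
    simp only [pvOkN, decide_eq_true_eq] at hok
    simp only [Option.getD_some]
    rw [pvValA_eq_pvClosed n hok, pvHeatsB_eq_pvClosed n hok]
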